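-- pv_equiv track=rewrite | github.com/CHHyuk/CodingTestPrac | Programmers_Quiz/ProgrammersQuiz_Lv,0/035.py | solution
-- ===== SOURCE A (Python) =====
-- def solution(n):
--     list1 = list(range(1,n+2))
--     result =[]
--     for i in range(len(list1)):
--         if i == 0:
--             continue
--         elif n % i == 0:
--             result = result + [i]
--         elif i == n:
--             result = result + [i]
--         else:
--             pass
--     return result
-- ===== SOURCE B (Python) =====
-- def solution(n):
--     small = []
--     large = []
--     i = 1
--     while i * i <= n:
--         if n % i == 0:
--             small.append(i)
--             if i * i != n:
--                 large.append(n // i)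
--         i += 1
--     return small + large[::-1]
-- ===== Notes on version B (the rewrite author's own statement) =====
-- stated objective: faster
-- what changed: Replaces A's scan of every candidate 1..n (which also rebuilds the result list on each append, making A quadratic) by trial division up to sqrt(n) that collects each divisor pair (i, n//i) into two lists and concatenates the large ones reversed.
import Mathlib
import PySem

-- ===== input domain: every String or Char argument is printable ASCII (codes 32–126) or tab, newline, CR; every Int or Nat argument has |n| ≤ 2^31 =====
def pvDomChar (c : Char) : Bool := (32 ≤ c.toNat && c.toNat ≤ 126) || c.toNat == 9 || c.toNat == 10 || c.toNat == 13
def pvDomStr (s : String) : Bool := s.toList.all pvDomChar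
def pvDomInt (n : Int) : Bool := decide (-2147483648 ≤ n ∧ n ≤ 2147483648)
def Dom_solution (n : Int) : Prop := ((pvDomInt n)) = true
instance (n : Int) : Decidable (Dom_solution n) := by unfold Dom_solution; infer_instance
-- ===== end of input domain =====

-- B lists the divisors of n by trial division up to √n, collecting each divisor pair (i, n//i),
-- instead of A's scan of every i in 1..n (which also rebuilds its result list on each append).

-- ===== PORT A =====
def solution (n : Int) : List Int :=
  let list1 := PySem.List.pyRange 1 (n + 2) 1
  (PySem.List.pyRange 0 (list1.length : Int) 1).foldl
    (fun result i =>
      if i == 0 then result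
      else if PySem.Int.mod n i == 0 then result ++ [i]
      else if i == n then result ++ [i]
      else result) []

-- ===== PORT B =====
-- the `while i * i <= n` loop of Source B; `i` starts at 1 and only increases, so it is a Nat here
def solLoop (n : Int) (i : Nat) (small large : List Int) : List Int × List Int :=
  if h : (i : Int) * (i : Int) ≤ n then
    if PySem.Int.mod n (i : Int) == 0 then
      let small' := small ++ [(i : Int)]
      let large' := if !((i : Int) * (i : Int) == n) then large ++ [PySem.Int.floordiv n (i : Int)] else large
      solLoop n (i + 1) small' large'
    else solLoop n (i + 1) small large
  else (small, large)
termination_by n.toNat + 1 - i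
decreasing_by
  all_goals
    have hii : (i : Int) ≤ (i : Int) * (i : Int) := by nlinarith [Int.natCast_nonneg i]
    have : (i : Int) ≤ n := le_trans hii h
    omega

-- large[::-1] is List.reverse (PySem.List.slice?_none_none_neg_one)
def solution_alt (n : Int) : List Int :=
  let p := solLoop n 1 [] []
  p.1 ++ p.2.reverse

-- ===== PRECONDITION & SPEC =====
def Spec_solution (n : Int) (out : List Int) : Prop := out = solution_alt n
instance (n : Int) (out : List Int) : Decidable (Spec_solution n out) := by unfold Spec_solution; infer_instance

-- ===== CLAIM (what is proved, stated in full; the proofs are below) =====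
def Claim_equal_solution : Prop := ∀ (n : Int), Dom_solution n → Spec_solution n (solution n)

-- ===== LEMMAS AND PROOFS =====

-- what B's loop (started at counter i) still appends: the divisors in i..√n, and n//j for those j
def smallDivs (n : Int) (i : Nat) : List Int :=
  (PySem.List.pyRange (i : Int) ((Nat.sqrt n.toNat : Int) + 1) 1).filter
    (fun j => PySem.Int.mod n j == 0)

def largeDivs (n : Int) (i : Nat) : List Int :=
  ((PySem.List.pyRange (i : Int) ((Nat.sqrt n.toNat : Int) + 1) 1).filter
    (fun j => PySem.Int.mod n j == 0 && !(j * j == n))).map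
    (fun j => PySem.Int.floordiv n j)

-- A returns exactly the i in 1..n with n % i == 0, in order (its `elif i == n` branch never fires)
theorem sol_A_char (n : Int) :
    solution n = (PySem.List.pyRange 1 (n + 1) 1).filter (fun j => PySem.Int.mod n j == 0) := by
  unfold solution
  simp only [PySem.List.length_pyRange_one]
  by_cases hle : n + 1 ≤ 0
  · rw [show ((n + 2 - 1).toNat : Int) = 0 by omega]
    rw [PySem.List.pyRange_one_eq_nil (le_refl 0), PySem.List.pyRange_one_eq_nil (by omega)]
    simp
  · rw [show ((n + 2 - 1).toNat : Int) = n + 1 by omega]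
    rw [PySem.List.pyRange_one_cons (by omega : (0:Int) < n + 1)]
    simp only [List.foldl_cons, beq_self_eq_true, if_pos]
    rw [PySem.List.foldl_congr_mem _ _
      (fun acc x => if (PySem.Int.mod n x == 0) = true then acc ++ [x] else acc) _ ?_]
    · rw [PySem.List.foldl_append_if (fun x => PySem.Int.mod n x == 0) (fun x => x)]
      simp
    · intro acc x hx
      rw [PySem.List.mem_pyRange_one] at hx
      have hx0 : (x == 0) = false := by simp; omega
      rw [hx0]
      simp only [Bool.false_eq_true, if_false]
      by_cases hm : PySem.Int.mod n x = 0
      · simp [hm]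
      · have hxn : (x == n) = false := by
          simp only [beq_eq_false_iff_ne, ne_eq]
          intro h; subst h
          exact hm ((PySem.Int.mod_eq_zero_iff_dvd x x).2 dvd_rfl)
        simp [hm, hxn]

theorem sq_le_iff (n x : Int) (hn : 0 ≤ n) (hx : 0 ≤ x) :
    x * x ≤ n ↔ x ≤ (Nat.sqrt n.toNat : Int) := by
  obtain ⟨a, rfl⟩ : ∃ a : Nat, x = a := ⟨x.toNat, (Int.toNat_of_nonneg hx).symm⟩
  obtain ⟨m, rfl⟩ : ∃ m : Nat, n = m := ⟨n.toNat, (Int.toNat_of_nonneg hn).symm⟩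
  rw [Int.toNat_natCast]
  constructor
  · intro h; exact_mod_cast Nat.le_sqrt.2 (by exact_mod_cast h)
  · intro h; exact_mod_cast Nat.le_sqrt.1 (by exact_mod_cast h)

-- loop invariant of B's while loop
theorem loop_char (n : Int) (hn : 0 ≤ n) (k : Nat) :
    ∀ (i : Nat), 1 ≤ i → Nat.sqrt n.toNat + 1 - i ≤ k → ∀ (small large : List Int),
      solLoop n i small large = (small ++ smallDivs n i, large ++ largeDivs n i) := by
  induction k with
  | zero =>
    intro i hi hk small large
    have hgt : ¬ ((i : Int) * (i : Int) ≤ n) := by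
      rw [sq_le_iff n i hn (by positivity)]
      omega
    rw [solLoop, dif_neg hgt]
    have hnil : PySem.List.pyRange (i : Int) ((Nat.sqrt n.toNat : Int) + 1) 1 = [] :=
      PySem.List.pyRange_one_eq_nil (by omega)
    simp [smallDivs, largeDivs, hnil]
  | succ k ih =>
    intro i hi hk small large
    by_cases hle : (i : Int) * (i : Int) ≤ n
    · have his : (i : Int) ≤ (Nat.sqrt n.toNat : Int) :=
        (sq_le_iff n i hn (by positivity)).1 hle
      have hisn : i ≤ Nat.sqrt n.toNat := by exact_mod_cast his
      have hcons : PySem.List.pyRange (i : Int) ((Nat.sqrt n.toNat : Int) + 1) 1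
          = (i : Int) :: PySem.List.pyRange ((i : Int) + 1) ((Nat.sqrt n.toNat : Int) + 1) 1 :=
        PySem.List.pyRange_one_cons (by omega)
      have hsmall : smallDivs n i = (if PySem.Int.mod n (i : Int) == 0 then [(i : Int)] else [])
          ++ smallDivs n (i + 1) := by
        rw [smallDivs, hcons, List.filter_cons]
        split <;> simp [smallDivs]
      have hlarge : largeDivs n i
          = (if PySem.Int.mod n (i : Int) == 0 && !((i:Int) * (i:Int) == n)
              then [PySem.Int.floordiv n (i : Int)] else [])
            ++ largeDivs n (i + 1) := by
        rw [largeDivs, hcons, List.filter_cons]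
        split <;> simp [largeDivs]
      have ih' := ih (i + 1) (by omega) (by omega)
      rw [solLoop, dif_pos hle]
      by_cases hm : PySem.Int.mod n (i : Int) = 0
      · simp only [hm, beq_self_eq_true, if_pos]
        by_cases hsq : (i : Int) * (i : Int) = n
        · simp only [hsq, beq_self_eq_true, Bool.not_true, Bool.false_eq_true, if_false]
          rw [ih', hsmall, hlarge]
          simp [hm, hsq]
        · have h' : ((i : Int) * (i : Int) == n) = false := by simpa using hsq
          simp only [h', Bool.not_false, if_pos]
          rw [ih', hsmall, hlarge]
          simp [hm, h']
      · have hm' : (PySem.Int.mod n (i : Int) == 0) = false := by simpa using hm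
        simp only [hm', Bool.false_eq_true, if_false]
        rw [ih', hsmall, hlarge]
        simp [hm']
    · have hnil : PySem.List.pyRange (i : Int) ((Nat.sqrt n.toNat : Int) + 1) 1 = [] := by
        apply PySem.List.pyRange_one_eq_nil
        have : ¬ ((i : Int) ≤ (Nat.sqrt n.toNat : Int)) := fun h =>
          hle ((sq_le_iff n i hn (by positivity)).2 h)
        omega
      rw [solLoop, dif_neg hle]
      simp [smallDivs, largeDivs, hnil]

theorem mem_small_iff (n : Int) (hn : 1 ≤ n) (x : Int) :
    x ∈ smallDivs n 1 ↔ 1 ≤ x ∧ x * x ≤ n ∧ x ∣ n := by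
  simp only [smallDivs, List.mem_filter, PySem.List.mem_pyRange_one, beq_iff_eq,
    PySem.Int.mod_eq_zero_iff_dvd]
  constructor
  · rintro ⟨⟨h1, h2⟩, h3⟩
    exact ⟨h1, (sq_le_iff n x (by omega) (by omega)).2 (by omega), h3⟩
  · rintro ⟨h1, h2, h3⟩
    have := (sq_le_iff n x (by omega) (by omega)).1 h2
    exact ⟨⟨h1, by omega⟩, h3⟩

-- j ↦ n // j pairs each divisor j ≤ √n with j*j ≠ n to one divisor x with x*x > n, and conversely
theorem mem_large_iff (n : Int) (hn : 1 ≤ n) (x : Int) :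
    x ∈ largeDivs n 1 ↔ 1 ≤ x ∧ n < x * x ∧ x ∣ n := by
  simp only [largeDivs, List.mem_map, List.mem_filter, PySem.List.mem_pyRange_one,
    Bool.and_eq_true, beq_iff_eq, PySem.Int.mod_eq_zero_iff_dvd, Bool.not_eq_eq_eq_not,
    Bool.not_true, beq_eq_false_iff_ne, ne_eq]
  constructor
  · rintro ⟨j, ⟨⟨hj1, hj2⟩, hjd, hjne⟩, rfl⟩
    obtain ⟨c, hc⟩ := hjd
    have hj0 : (0:Int) < j := by omega
    have hjj : j * j ≤ n := (sq_le_iff n j (by omega) (by omega)).2 (by omega)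
    have hjlt : j * j < n := lt_of_le_of_ne hjj hjne
    have hc1 : (1:Int) ≤ c := by nlinarith
    have hfl : PySem.Int.floordiv n j = c := by
      rw [PySem.Int.floordiv_eq_ediv_of_pos hj0, hc, Int.mul_ediv_cancel_left _ (by omega)]
    rw [hfl]
    refine ⟨hc1, by nlinarith, ⟨j, by linarith [hc]⟩⟩
  · rintro ⟨hx1, hx2, ⟨c, hc⟩⟩
    have hx0 : (0:Int) < x := by omega
    have hc1 : (1:Int) ≤ c := by nlinarith
    have hcx : c < x := by nlinarith
    refine ⟨c, ⟨⟨hc1, ?_⟩, ⟨x, by linarith⟩, ?_⟩, ?_⟩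
    · have h2 : c * c ≤ n := by nlinarith
      have := (sq_le_iff n c (by omega) (by omega)).1 h2
      omega
    · intro h; nlinarith
    · rw [PySem.Int.floordiv_eq_ediv_of_pos (by omega : (0:Int) < c), hc, mul_comm,
        Int.mul_ediv_cancel_left _ (by omega)]

theorem eq_of_pairwise_lt_of_mem (l₁ l₂ : List Int)
    (h₁ : l₁.Pairwise (· < ·)) (h₂ : l₂.Pairwise (· < ·))
    (h : ∀ a, a ∈ l₁ ↔ a ∈ l₂) : l₁ = l₂ := by
  have n1 : l₁.Nodup := h₁.imp (fun h => ne_of_lt h)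
  have n2 : l₂.Nodup := h₂.imp (fun h => ne_of_lt h)
  exact ((List.perm_ext_iff_of_nodup n1 n2).2 h).eq_of_pairwise
    (fun a b _ _ hab hba => le_antisymm hab hba) (h₁.imp le_of_lt) (h₂.imp le_of_lt)

-- the ascending divisor list 1..n is the small divisors followed by the large ones reversed
theorem divisors_split (n : Int) (hn : 1 ≤ n) :
    (PySem.List.pyRange 1 (n + 1) 1).filter (fun j => PySem.Int.mod n j == 0)
      = smallDivs n 1 ++ (largeDivs n 1).reverse := by
  apply eq_of_pairwise_lt_of_mem
  · exact (PySem.List.pairwise_lt_pyRange_one _ _).filter _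
  · rw [List.pairwise_append]
    refine ⟨(PySem.List.pairwise_lt_pyRange_one _ _).filter _, ?_, ?_⟩
    · rw [List.pairwise_reverse]
      unfold largeDivs
      rw [List.pairwise_map]
      refine List.Pairwise.imp_of_mem ?_ ((PySem.List.pairwise_lt_pyRange_one _ _).filter _)
      intro a b ha hb hab
      simp only [List.mem_filter, PySem.List.mem_pyRange_one, Bool.and_eq_true, beq_iff_eq,
        PySem.Int.mod_eq_zero_iff_dvd] at ha hb
      obtain ⟨⟨ha1, _⟩, ⟨c, hc⟩, _⟩ := ha
      obtain ⟨⟨hb1, _⟩, ⟨d, hd⟩, _⟩ := hb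
      have hfa : PySem.Int.floordiv n a = c := by
        rw [PySem.Int.floordiv_eq_ediv_of_pos (by omega : (0:Int) < a), hc,
          Int.mul_ediv_cancel_left _ (by omega)]
      have hfb : PySem.Int.floordiv n b = d := by
        rw [PySem.Int.floordiv_eq_ediv_of_pos (by omega : (0:Int) < b), hd,
          Int.mul_ediv_cancel_left _ (by omega)]
      rw [hfa, hfb]
      have hd1 : (1:Int) ≤ d := by nlinarith
      nlinarith
    · intro a ha b hb
      rw [List.mem_reverse] at hb
      rw [mem_small_iff n hn] at ha
      rw [mem_large_iff n hn] at hb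
      nlinarith [ha.1, ha.2.1, hb.1, hb.2.1]
  · intro x
    simp only [List.mem_filter, PySem.List.mem_pyRange_one, beq_iff_eq,
      PySem.Int.mod_eq_zero_iff_dvd, List.mem_append, List.mem_reverse,
      mem_small_iff n hn, mem_large_iff n hn]
    constructor
    · rintro ⟨⟨h1, h2⟩, h3⟩
      by_cases h : x * x ≤ n
      · exact Or.inl ⟨h1, h, h3⟩
      · exact Or.inr ⟨h1, by omega, h3⟩
    · rintro (⟨h1, h2, h3⟩ | ⟨h1, h2, h3⟩)
      · have : x ≤ n := by nlinarith
        exact ⟨⟨h1, by omega⟩, h3⟩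
      · have : x ≤ n := Int.le_of_dvd (by omega) h3
        exact ⟨⟨h1, by omega⟩, h3⟩

-- ===== VERDICT (by name: the statement is the Claim_ definition above) =====
theorem solution_spec : Claim_equal_solution := by
  intro n _
  unfold Spec_solution solution_alt
  by_cases hle : n ≤ 0
  · rw [sol_A_char, PySem.List.pyRange_one_eq_nil (by omega)]
    rw [solLoop]
    rw [dif_neg (by push_cast; omega)]
    simp
  · rw [sol_A_char, divisors_split n (by omega),
      loop_char n (by omega) (Nat.sqrt n.toNat + 1) 1 (by omega) (by omega)]
    simp
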